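-- pv_equiv track=rewrite | github.com/sethbroberts/fundamentals_of_measurement | fom.py | find_partition_from_mapping
-- ===== SOURCE A (Python) =====
-- def find_partition_from_mapping(mapping):
--     "Given a mapping, find the corresponding equivalence relation"
--     cache = {}
--     for s, x in mapping:
--         if not str(x) in cache:
--             cache[str(x)] = []
--         cache[str(x)].append(s)
--     partition = []
--     for x in cache:
--         block = cache[x]
--         block.sort()
--         partition.append(block)
--     partition.sort()
--     return partition
-- ===== SOURCE B (Python) =====
-- def find_partition_from_mapping(mapping):
--     "Given a mapping, find the corresponding equivalence relation"
--     pairs = sorted(((str(x), s) for s, x in mapping), key=lambda p: p[0])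
--     partition = []
--     i, n = 0, len(pairs)
--     while i < n:
--         j = i
--         while j < n and pairs[j][0] == pairs[i][0]:
--             j += 1
--         partition.append(sorted(s for _, s in pairs[i:j]))
--         i = j
--     partition.sort()
--     return partition
-- ===== Notes on version B (the rewrite author's own statement) =====
-- stated objective: alternative
-- what changed: Replaces A's dict-of-lists accumulation (hash grouping by str(x), then per-block sort) with sort-then-scan grouping: the (str(x), s) pairs are sorted by key and adjacent equal-key runs become the blocks, so no dict or membership test remains.
import Mathlib
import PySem

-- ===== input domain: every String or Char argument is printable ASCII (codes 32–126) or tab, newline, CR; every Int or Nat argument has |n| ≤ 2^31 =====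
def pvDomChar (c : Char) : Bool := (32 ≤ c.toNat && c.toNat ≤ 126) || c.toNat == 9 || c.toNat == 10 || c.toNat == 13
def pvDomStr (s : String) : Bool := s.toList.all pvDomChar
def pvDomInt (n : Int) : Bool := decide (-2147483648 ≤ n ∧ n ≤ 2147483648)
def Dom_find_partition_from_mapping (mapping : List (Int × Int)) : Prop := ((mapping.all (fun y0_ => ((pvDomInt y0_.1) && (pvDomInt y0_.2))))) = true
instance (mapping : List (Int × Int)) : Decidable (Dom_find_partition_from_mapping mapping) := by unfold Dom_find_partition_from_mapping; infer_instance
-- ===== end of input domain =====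

-- B replaces A's dict-of-blocks accumulation by sort-then-scan grouping of the (str(x), s)
-- pairs (adjacent equal keys after sorting form the blocks); alternative decomposition, same result.

-- ===== PORT A =====
def find_partition_from_mapping (mapping : List (Int × Int)) : List (List Int) :=
  let cache : PySem.Dict String (List Int) :=
    mapping.foldl (fun cache p =>
      let cache := if cache.contains (PySem.Int.toStr p.2) then cache
                   else cache.insert (PySem.Int.toStr p.2) []
      cache.modify (PySem.Int.toStr p.2) [] (fun b => b ++ [p.1])) PySem.Dict.empty
  let partition : List (List Int) :=
    cache.items.foldl (fun partition kv =>
      partition ++ [PySem.List.sorted kv.2 (fun y => y) false]) []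
  PySem.List.sorted partition (fun y => y) false

-- ===== PORT B =====
-- the outer/inner while loops of Source B: each step peels the maximal run of pairs sharing
-- the first key (pairs[i:j]) and emits the sorted list of their second components
def pvGroupB : List (String × Int) → List (List Int)
  | [] => []
  | q :: rest =>
    PySem.List.sorted (((q :: rest).takeWhile (fun r => r.1 == q.1)).map (fun r => r.2)) (fun y => y) false
      :: pvGroupB ((q :: rest).dropWhile (fun r => r.1 == q.1))
termination_by l => l.length
decreasing_by
  simp only [List.dropWhile_cons, beq_self_eq_true, if_true]
  exact Nat.lt_succ_of_le (List.length_dropWhile_le _ _)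

def find_partition_from_mapping_alt (mapping : List (Int × Int)) : List (List Int) :=
  let pairs := PySem.List.sorted (mapping.map (fun p => (PySem.Int.toStr p.2, p.1))) (fun p => p.1) false
  PySem.List.sorted (pvGroupB pairs) (fun y => y) false

-- ===== PRECONDITION & SPEC =====
def Spec_find_partition_from_mapping (mapping : List (Int × Int)) (out : List (List Int)) : Prop := out = find_partition_from_mapping_alt mapping
instance (mapping : List (Int × Int)) (out : List (List Int)) : Decidable (Spec_find_partition_from_mapping mapping out) := by unfold Spec_find_partition_from_mapping; infer_instance

-- ===== CLAIM (what is proved, stated in full; the proofs are below) =====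
def Claim_equal_find_partition_from_mapping : Prop := ∀ (mapping : List (Int × Int)), Dom_find_partition_from_mapping mapping → Spec_find_partition_from_mapping mapping (find_partition_from_mapping mapping)

-- ===== LEMMAS AND PROOFS =====

-- the list of (str(x), s) pairs both sides group
def pvPairs (mapping : List (Int × Int)) : List (String × Int) :=
  mapping.map (fun p => (PySem.Int.toStr p.2, p.1))

-- the block belonging to key k (common normal form of both sides)
def pvBlock (mapping : List (Int × Int)) (k : String) : List Int :=
  PySem.List.sorted (((pvPairs mapping).filter (fun q => q.1 == k)).map (fun q => q.2)) (fun y => y) false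

-- A's guarded dict step (insert-[]-then-append) is modify with default []
theorem pvStepA (d : PySem.Dict String (List Int)) (k : String) (v : Int) :
    ((if d.contains k then d else d.insert k []).modify k [] (fun b => b ++ [v]))
      = d.modify k [] (fun b => b ++ [v]) := by
  by_cases h : d.contains k
  · simp [h]
  · simp only [h, Bool.false_eq_true, if_false, PySem.Dict.modify,
      PySem.Dict.getD_insert_self, PySem.Dict.insert_insert_self,
      PySem.Dict.getD_of_not_contains (h := Bool.of_not_eq_true h)]

-- A = one sorted block per distinct key, keys in first-occurrence order
theorem pvA_eq (mapping : List (Int × Int)) :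
    find_partition_from_mapping mapping
      = PySem.List.sorted ((PySem.Set.ofList ((pvPairs mapping).map (fun q => q.1))).map (pvBlock mapping)) (fun y => y) false := by
  unfold find_partition_from_mapping
  simp only [pvStepA]
  rw [show (mapping.foldl (fun cache p => cache.modify (PySem.Int.toStr p.2) [] (fun b => b ++ [p.1])) PySem.Dict.empty)
        = ((pvPairs mapping).foldl (fun d q => d.modify q.1 [] (fun b => b ++ [q.2])) PySem.Dict.empty) by
      rw [pvPairs, List.foldl_map]]
  have hnd : ((pvPairs mapping).foldl (fun d q => d.modify q.1 [] (fun b => b ++ [q.2])) PySem.Dict.empty).keys.Nodup :=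
    PySem.Dict.nodup_keys_foldl_modify_key (pvPairs mapping) (fun (q : String × Int) => q.1) [] (fun d q => fun b => b ++ [q.2]) PySem.Dict.empty (by simp [pysem])
  rw [PySem.List.foldl_append_singleton_eq_map (fun kv : String × List Int => PySem.List.sorted kv.2 (fun y => y) false)]
  rw [PySem.Dict.items_eq_map_keys _ hnd []]
  rw [PySem.Dict.keys_foldl_modify_key (pvPairs mapping) (fun (q : String × Int) => q.1) [] (fun d q => fun b => b ++ [q.2]) PySem.Dict.empty]
  simp only [List.map_map, List.nil_append]
  have hupd : PySem.Set.update (PySem.Dict.empty : PySem.Dict String (List Int)).keys ((pvPairs mapping).map (fun q => q.1))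
      = PySem.Set.ofList ((pvPairs mapping).map (fun q => q.1)) := rfl
  rw [hupd]
  congr 1
  apply List.map_congr_left
  intro k hk
  simp only [Function.comp]
  rw [PySem.Dict.getD_foldl_modify_append]
  simp [pvBlock]

theorem pvDropWhileHead {α : Type} (p : α → Bool) : ∀ (l : List α) (r0 : α) (t : List α),
    l.dropWhile p = r0 :: t → p r0 = false := by
  intro l
  induction l with
  | nil => intro r0 t h; simp [List.dropWhile] at h
  | cons a l ih =>
    intro r0 t h
    rw [List.dropWhile_cons] at h
    by_cases hp : p a
    · rw [if_pos hp] at h; exact ih r0 t h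
    · rw [if_neg hp] at h; cases h; simpa using hp

theorem pvAddMem {α : Type} [BEq α] [LawfulBEq α] (s : PySem.Set α) (x : α) (h : x ∈ s) :
    PySem.Set.add s x = s := by
  simp [PySem.Set.add, h]

theorem pvUpdateConst {α : Type} [BEq α] [LawfulBEq α] (xs : List α) (s : PySem.Set α) (k : α)
    (hxs : ∀ x ∈ xs, x = k) (hk : k ∈ s) : PySem.Set.update s xs = s := by
  induction xs generalizing s with
  | nil => rfl
  | cons a t ih =>
    have ha : a = k := hxs a (by simp)
    show PySem.Set.update (PySem.Set.add s a) t = s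
    rw [ha, pvAddMem s k hk]
    exact ih s (fun x hx => hxs x (List.mem_cons_of_mem a hx)) hk

theorem pvUpdateCons {α : Type} [BEq α] [LawfulBEq α] (ys : List α) (a : α) (s : PySem.Set α)
    (h : a ∉ ys) : PySem.Set.update (a :: s) ys = a :: PySem.Set.update s ys := by
  induction ys generalizing s with
  | nil => rfl
  | cons y t ih =>
    have hya : (y == a) = false := beq_eq_false_iff_ne.mpr (fun e => h (by simp [e]))
    show PySem.Set.update (PySem.Set.add (a :: s) y) t = a :: PySem.Set.update (PySem.Set.add s y) t
    have hadd : PySem.Set.add (a :: s) y = a :: PySem.Set.add s y := by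
      simp only [PySem.Set.add, PySem.Set.contains, List.contains_cons, hya, Bool.false_or]
      by_cases hc : y ∈ s
      · simp [hc]
      · simp [hc]
    rw [hadd]
    exact ih (PySem.Set.add s y) (fun hy => h (List.mem_cons_of_mem y hy))

theorem pvOfListGroup (k : String) (ks rest : List String)
    (hks : ∀ x ∈ ks, x = k) (hrest : k ∉ rest) :
    PySem.Set.ofList (k :: (ks ++ rest)) = k :: PySem.Set.ofList rest := by
  have h1 : PySem.Set.ofList (k :: (ks ++ rest))
      = PySem.Set.update (PySem.Set.update (PySem.Set.add PySem.Set.empty k) ks) rest := by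
    simp [PySem.Set.ofList, PySem.Set.update, List.foldl_append]
  have h2 : PySem.Set.add (PySem.Set.empty : PySem.Set String) k = [k] := rfl
  rw [h1, h2, pvUpdateConst ks [k] k hks (by simp), pvUpdateCons rest k [] hrest]
  rfl

-- grouping a key-sorted pair list by adjacency = one block per distinct key
theorem pvGroupB_eq (l : List (String × Int)) (h : l.Pairwise (fun a b => a.1 ≤ b.1)) :
    pvGroupB l = (PySem.Set.ofList (l.map (fun q => q.1))).map
      (fun k => PySem.List.sorted ((l.filter (fun q => q.1 == k)).map (fun q => q.2)) (fun y => y) false) := by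
  induction l using pvGroupB.induct with
  | case1 => simp [pvGroupB]
  | case2 q rest ih =>
    have hpq : (fun r : String × Int => r.1 == q.1) q = true := by simp
    have hsplit : ((q :: rest).takeWhile (fun r : String × Int => r.1 == q.1)) ++ ((q :: rest).dropWhile (fun r => r.1 == q.1)) = q :: rest :=
      List.takeWhile_append_dropWhile
    have hgrpmem : ∀ r ∈ (q :: rest).takeWhile (fun r : String × Int => r.1 == q.1), r.1 = q.1 := by
      intro r hr
      have := List.mem_takeWhile_imp hr
      simpa using this
    have hsp : (((q :: rest).takeWhile (fun r : String × Int => r.1 == q.1)) ++ ((q :: rest).dropWhile (fun r => r.1 == q.1))).Pairwise (fun a b => a.1 ≤ b.1) := by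
      rw [hsplit]; exact h
    obtain ⟨htakep, hdropp, hcross⟩ := List.pairwise_append.mp hsp
    have hqmem : q ∈ (q :: rest).takeWhile (fun r : String × Int => r.1 == q.1) := by
      rw [List.takeWhile_cons, if_pos hpq]; simp
    have hrestmem : ∀ r ∈ (q :: rest).dropWhile (fun r : String × Int => r.1 == q.1), r.1 ≠ q.1 := by
      intro r hr
      cases hd : (q :: rest).dropWhile (fun r : String × Int => r.1 == q.1) with
      | nil => rw [hd] at hr; simp at hr
      | cons r0 t =>
        have h0 : (fun r : String × Int => r.1 == q.1) r0 = false :=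
          pvDropWhileHead (fun r : String × Int => r.1 == q.1) (q :: rest) r0 t hd
        have h0' : r0.1 ≠ q.1 := by simpa using h0
        have hq0 : q.1 ≤ r0.1 := hcross q hqmem r0 (by rw [hd]; simp)
        have hlt : q.1 < r0.1 := lt_of_le_of_ne hq0 (fun e => h0' e.symm)
        rw [hd] at hr hdropp
        rcases List.mem_cons.mp hr with he | ht
        · subst he; exact h0'
        · have : r0.1 ≤ r.1 := (List.pairwise_cons.mp hdropp).1 r ht
          exact fun e => absurd (lt_of_lt_of_le hlt this) (by simp [e])
    have hfilter : (q :: rest).filter (fun r : String × Int => r.1 == q.1)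
        = (q :: rest).takeWhile (fun r : String × Int => r.1 == q.1) := by
      conv_lhs => rw [← hsplit]
      rw [List.filter_append]
      rw [List.filter_eq_self.mpr (fun r hr => by simpa using hgrpmem r hr),
        List.filter_eq_nil_iff.mpr (fun r hr => by simpa using hrestmem r hr)]
      simp
    have hkeys : PySem.Set.ofList ((q :: rest).map (fun r : String × Int => r.1))
        = q.1 :: PySem.Set.ofList (((q :: rest).dropWhile (fun r : String × Int => r.1 == q.1)).map (fun r => r.1)) := by
      conv_lhs => rw [← hsplit]
      rw [List.map_append]
      have htk : ((q :: rest).takeWhile (fun r : String × Int => r.1 == q.1)).map (fun r => r.1)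
          = q.1 :: ((rest.takeWhile (fun r : String × Int => r.1 == q.1)).map (fun r => r.1)) := by
        rw [List.takeWhile_cons, if_pos hpq]; simp
      rw [htk]
      rw [List.cons_append]
      exact pvOfListGroup q.1 _ _
        (by
          intro x hx
          rcases List.mem_map.mp hx with ⟨r, hr, he⟩
          have : r ∈ (q :: rest).takeWhile (fun r : String × Int => r.1 == q.1) := by
            rw [List.takeWhile_cons, if_pos hpq]; exact List.mem_cons_of_mem _ hr
          rw [← he]; exact hgrpmem r this)
        (by
          intro hx
          rcases List.mem_map.mp hx with ⟨r, hr, he⟩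
          exact hrestmem r hr he)
    rw [pvGroupB, hkeys, List.map_cons]
    congr 1
    · rw [hfilter]
    · rw [ih (List.Pairwise.sublist (List.dropWhile_sublist _) h)]
      apply List.map_congr_left
      intro k hk
      have hkne : k ≠ q.1 := by
        rcases List.mem_map.mp ((PySem.Set.mem_ofList _ _).mp hk) with ⟨r, hr, he⟩
        rw [← he]; exact hrestmem r hr
      have htfil : ((q :: rest).takeWhile (fun r : String × Int => r.1 == q.1)).filter (fun r => r.1 == k) = [] := by
        rw [List.filter_eq_nil_iff]
        intro r hr
        have hh : r.1 = q.1 := hgrpmem r hr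
        simp only [hh, beq_iff_eq]
        exact fun e => hkne e.symm
      congr 2
      conv_rhs => rw [← hsplit]
      rw [List.filter_append, htfil, List.nil_append]

-- B = one sorted block per distinct key, keys in sorted order
theorem pvB_eq (mapping : List (Int × Int)) :
    find_partition_from_mapping_alt mapping
      = PySem.List.sorted ((PySem.Set.ofList (((PySem.List.sorted (pvPairs mapping) (fun p => p.1) false)).map (fun q => q.1))).map (pvBlock mapping)) (fun y => y) false := by
  show PySem.List.sorted (pvGroupB (PySem.List.sorted (mapping.map (fun p => (PySem.Int.toStr p.2, p.1))) (fun p => p.1) false)) (fun y => y) false = _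
  have hpw : (PySem.List.sorted (pvPairs mapping) (fun p => p.1) false).Pairwise (fun a b => a.1 ≤ b.1) :=
    PySem.List.sorted_pairwise (pvPairs mapping) (fun p => p.1)
  rw [show mapping.map (fun p => (PySem.Int.toStr p.2, p.1)) = pvPairs mapping from rfl]
  rw [pvGroupB_eq _ hpw]
  congr 1
  apply List.map_congr_left
  intro k _
  have hperm : ((PySem.List.sorted (pvPairs mapping) (fun p => p.1) false).filter (fun q => q.1 == k)).map (fun q => q.2)
      |>.Perm (((pvPairs mapping).filter (fun q => q.1 == k)).map (fun q => q.2)) :=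
    List.Perm.map _ (List.Perm.filter _ (PySem.List.sorted_perm _ _ _))
  rw [pvBlock]
  exact PySem.List.sorted_eq_sorted_of_perm _ _ _ (fun a b h => h) hperm

-- the ports' `partition.sort()` instance rewritten to the LinearOrder instances of the library lemmas
theorem pvSortInst (xs : List (List Int)) :
    PySem.List.sorted xs (fun y => y) false
      = @PySem.List.sorted _ _ List.instLinearOrder.toLT LinearOrder.toDecidableLT xs (fun y => y) false := by
  rw [show (fun (a b : List Int) => a.decidableLT b) = (LinearOrder.toDecidableLT : DecidableLT (List Int)) from
    by funext a b; exact Subsingleton.elim _ _]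

-- ===== VERDICT (by name: the statement is the Claim_ definition above) =====
theorem find_partition_from_mapping_spec : Claim_equal_find_partition_from_mapping := by
  intro mapping _
  unfold Spec_find_partition_from_mapping
  rw [pvA_eq, pvB_eq, pvSortInst, pvSortInst]
  apply PySem.List.sorted_eq_sorted_of_perm _ _ _ (fun a b h => h)
  apply List.Perm.map
  rw [List.perm_ext_iff_of_nodup (PySem.Set.nodup_ofList _) (PySem.Set.nodup_ofList _)]
  intro a
  simp only [PySem.Set.mem_ofList]
  exact (List.Perm.mem_iff (List.Perm.map _ (PySem.List.sorted_perm _ _ _))).symm
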